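-- pv_equiv track=rewrite | github.com/SiChiTong/pandora_control | pandora_motion_control/src/pandora_kinodynamic_control/utils.py | state_mapper
-- ===== SOURCE A (Python) =====
-- def state_mapper(a,states):
--     """ @brief: Maps a set of integers , representing the state given as a tuple
--     substates to an integer representing the total state.Each input combination
--     must result in a different integer.
--
--     @param a: Input as substates.
--     @type a: tuple of integers
--     @param states: List containing total states count of each substate
--     @type states: List of integers
--
--     @return: The total state as an integer.
--     @note : Logic for achieving so is the following :
--         STATES = [N0,N1,N2,...,NK]
--           A    = (a0,a1,a2,...,ak)  ,  ai e [0,N0-1]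
--
--          Total_state = a0*1 + a1* N0 + a2* N0*N1 + ... + ak *(N0*N1*...*N(K-1))
--     """
--     # Construct Coefficients vector:
--     coefficient = [1]
--     for i in range(1,len(a)):
--         coefficient.append(coefficient[i-1]*states[i-1])
--
--     total_state = 0
--
--     for i in range(len(a)):
--         total_state += a[i]*coefficient[i]
--
--     return total_state
-- ===== SOURCE B (Python) =====
-- def state_mapper(a, states):
--     if not a:
--         return 0
--     total = a[-1]
--     for i in range(len(a) - 2, -1, -1):
--         total = total * states[i] + a[i]
--     return total
-- ===== Notes on version B (the rewrite author's own statement) =====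
-- stated objective: simpler
-- what changed: Replaces the two-pass coefficient-table construction plus dot-product with a single backward Horner pass that keeps only one running total.
import Mathlib
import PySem

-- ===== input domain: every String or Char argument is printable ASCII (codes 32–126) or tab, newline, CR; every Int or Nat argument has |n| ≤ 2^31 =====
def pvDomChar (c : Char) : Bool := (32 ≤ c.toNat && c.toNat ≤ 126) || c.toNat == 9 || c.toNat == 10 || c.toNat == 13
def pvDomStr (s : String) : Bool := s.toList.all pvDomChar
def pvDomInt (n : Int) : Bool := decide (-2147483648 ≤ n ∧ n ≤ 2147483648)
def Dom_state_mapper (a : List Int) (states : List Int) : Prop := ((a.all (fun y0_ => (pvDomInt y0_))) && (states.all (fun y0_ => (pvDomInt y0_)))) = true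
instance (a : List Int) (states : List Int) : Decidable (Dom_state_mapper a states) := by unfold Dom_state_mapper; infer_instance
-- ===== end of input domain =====

-- B replaces A's coefficient-table pass plus dot-product pass by a single backward Horner pass (simpler, one running total).

-- ===== PORT A =====
def state_mapper (a : List Int) (states : List Int) : Int :=
  let coefficient := (PySem.List.pyRange 1 (PySem.List.len a) 1).foldl
    (fun c i => c ++ [PySem.List.pyGetD c (i - 1) 0 * PySem.List.pyGetD states (i - 1) 0]) [1]
  (PySem.List.pyRange 0 (PySem.List.len a) 1).foldl
    (fun t i => t + PySem.List.pyGetD a i 0 * PySem.List.pyGetD coefficient i 0) 0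

-- ===== PORT B =====
def state_mapper_alt (a : List Int) (states : List Int) : Int :=
  if a = [] then 0
  else
    (PySem.List.pyRange (PySem.List.len a - 2) (-1) (-1)).foldl
      (fun total i => total * PySem.List.pyGetD states i 0 + PySem.List.pyGetD a i 0)
      (PySem.List.pyGetD a (-1) 0)

-- ===== PRECONDITION & SPEC =====
-- Pre_ excludes exactly the inputs where Python A raises IndexError (states shorter than len(a)-1).
def Pre_state_mapper (a : List Int) (states : List Int) : Prop := a.length ≤ states.length + 1
instance (a : List Int) (states : List Int) : Decidable (Pre_state_mapper a states) := by unfold Pre_state_mapper; infer_instance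
def pvWitness_state_mapper : List Int × List Int := ([1, 2, 1], [3, 4, 2])
def Spec_state_mapper (a : List Int) (states : List Int) (out : Int) : Prop := out = state_mapper_alt a states
instance (a : List Int) (states : List Int) (out : Int) : Decidable (Spec_state_mapper a states out) := by unfold Spec_state_mapper; infer_instance

-- ===== CLAIM (what is proved, stated in full; the proofs are below) =====
def Claim_equal_state_mapper : Prop := ∀ (a : List Int) (states : List Int), Dom_state_mapper a states → Pre_state_mapper a states → Spec_state_mapper a states (state_mapper a states)

-- ===== LEMMAS AND PROOFS =====

-- mixed-radix coefficient: product of the first k radices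
def pvC (states : List Int) (k : Nat) : Int := ((List.range k).map (fun j => states.getD j 0)).prod
-- partial mixed-radix value of the first n digits
def pvS (a states : List Int) (n : Nat) : Int := ((List.range n).map (fun k => a.getD k 0 * pvC states k)).sum

theorem pvC_zero (states : List Int) : pvC states 0 = 1 := by simp [pvC]

theorem pvC_succ (states : List Int) (k : Nat) : pvC states (k + 1) = pvC states k * states.getD k 0 := by
  simp [pvC, List.range_succ]

theorem pvS_zero (a states : List Int) : pvS a states 0 = 0 := by simp [pvS]

theorem pvS_succ (a states : List Int) (n : Nat) :
    pvS a states (n + 1) = pvS a states n + a.getD n 0 * pvC states n := by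
  simp [pvS, List.range_succ]

theorem pv_foldl_add (g : Int → Int) : ∀ (l : List Int) (init : Int),
    l.foldl (fun t i => t + g i) init = init + (l.map g).sum := by
  intro l
  induction l with
  | nil => intro init; simp
  | cons x xs ih => intro init; simp [List.foldl_cons, ih, add_assoc]

-- A's first loop builds exactly the coefficient table [pvC 0, …, pvC (n-1)]
theorem pvA_coeff (states : List Int) : ∀ (n : Nat), 1 ≤ n →
    (PySem.List.pyRange 1 (n : Int) 1).foldl
      (fun c i => c ++ [PySem.List.pyGetD c (i - 1) 0 * PySem.List.pyGetD states (i - 1) 0]) [1]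
    = (List.range n).map (pvC states) := by
  intro n
  induction n with
  | zero => intro h; omega
  | succ m ih =>
    intro _
    by_cases hm : 1 ≤ m
    · have hcast : ((m + 1 : Nat) : Int) = (m : Int) + 1 := by push_cast; ring
      rw [hcast, PySem.List.pyRange_one_succ_right (by exact_mod_cast hm), List.foldl_append, ih hm]
      simp only [List.foldl_cons, List.foldl_nil]
      have hm1 : (m : Int) - 1 = ((m - 1 : Nat) : Int) := by omega
      rw [hm1, PySem.List.pyGetD_natCast, PySem.List.pyGetD_natCast]
      have hlt : m - 1 < m := by omega
      have h1 : ((List.range m).map (pvC states)).getD (m - 1) 0 = pvC states (m - 1) := by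
        rw [List.getD_eq_getElem?_getD]
        simp [hlt]
      rw [h1]
      have h2 : pvC states (m - 1) * states.getD (m - 1) 0 = pvC states m := by
        have := pvC_succ states (m - 1)
        rw [Nat.sub_add_cancel hm] at this
        omega
      rw [h2, List.range_succ, List.map_append]
      simp
    · have hm0 : m = 0 := by omega
      subst hm0
      rw [show ((1 : Nat) : Int) = 1 by norm_num, PySem.List.pyRange_one_eq_nil (by norm_num)]
      simp [List.range_succ, pvC_zero]

-- B's backward loop computes t·pvC(m) + pvS(m)
theorem pvB_loop (a states : List Int) : ∀ (m : Nat) (t : Int),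
    (PySem.List.pyRange ((m : Int) - 1) (-1) (-1)).foldl
      (fun total i => total * PySem.List.pyGetD states i 0 + PySem.List.pyGetD a i 0) t
    = t * pvC states m + pvS a states m := by
  intro m
  induction m with
  | zero =>
    intro t
    rw [show ((0 : Nat) : Int) - 1 = -1 by norm_num, PySem.List.pyRange_neg_one_eq_nil (by norm_num)]
    simp [pvC_zero, pvS_zero]
  | succ k ih =>
    intro t
    have hcast : ((k + 1 : Nat) : Int) - 1 = (k : Int) := by push_cast; ring
    rw [hcast, PySem.List.pyRange_neg_one_cons (by omega)]
    simp only [List.foldl_cons]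
    rw [ih]
    rw [show ((k : Int)) = ((k : Nat) : Int) from rfl, PySem.List.pyGetD_natCast, PySem.List.pyGetD_natCast]
    rw [pvC_succ, pvS_succ]
    ring

theorem state_mapper_eq_pvS (a states : List Int) : state_mapper a states = pvS a states a.length := by
  unfold state_mapper
  simp only [PySem.List.len_eq]
  by_cases ha : a.length = 0
  · rw [ha]
    rw [show ((0 : Nat) : Int) = 0 by norm_num]
    rw [PySem.List.pyRange_one_eq_nil (by norm_num)]
    simp [pvS_zero]
  · have h1 : 1 ≤ a.length := by omega
    rw [pvA_coeff states a.length h1]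
    rw [pv_foldl_add]
    rw [PySem.List.pyRange_zero_natCast]
    rw [List.map_map]
    simp only [pvS, Function.comp_def]
    rw [zero_add]
    congr 1
    apply List.map_congr_left
    intro k hk
    rw [List.mem_range] at hk
    rw [PySem.List.pyGetD_natCast, PySem.List.pyGetD_natCast]
    have : ((List.range a.length).map (pvC states)).getD k 0 = pvC states k := by
      rw [List.getD_eq_getElem?_getD]; simp [hk]
    rw [this]

theorem state_mapper_alt_eq_pvS (a states : List Int) : state_mapper_alt a states = pvS a states a.length := by
  unfold state_mapper_alt
  by_cases ha : a = []
  · simp [ha, pvS_zero]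
  · rw [if_neg ha]
    simp only [PySem.List.len_eq]
    have h1 : 1 ≤ a.length := by
      cases a with
      | nil => exact absurd rfl ha
      | cons x xs => simp
    have hcast : (a.length : Int) - 2 = ((a.length - 1 : Nat) : Int) - 1 := by omega
    rw [hcast, pvB_loop a states (a.length - 1)]
    rw [PySem.List.pyGetD_neg_one a 0 ha]
    have hlast : a.getLast ha = a.getD (a.length - 1) 0 := by
      rw [List.getLast_eq_getElem, List.getD_eq_getElem?_getD]
      simp [Nat.sub_lt h1]
    rw [hlast]
    have := pvS_succ a states (a.length - 1)
    rw [Nat.sub_add_cancel h1] at this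
    rw [this]
    ring

-- ===== VERDICT (by name: the statement is the Claim_ definition above) =====
theorem state_mapper_spec : Claim_equal_state_mapper := by
  intro a states _ _
  show state_mapper a states = state_mapper_alt a states
  rw [state_mapper_eq_pvS, state_mapper_alt_eq_pvS]
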